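-- pv_equiv track=rewrite | github.com/Thewessen/hello-world | deCipher/genetic.py | block_freq
-- ===== SOURCE A (Python) =====
-- def clean_datastr(datastr):
--     if datastr.find(' ') or datastr.find('\n') or datastr.find('\r'):
--         datastr = "".join(datastr.split())
--     if not datastr.isupper():
--         datastr = datastr.upper()
--     return datastr
--
-- def block_group(datastr,  blksize):
--     datastr = clean_datastr(datastr)
--     return [datastr[i:i+blksize] for i in range(0, len(datastr), blksize)]
--
-- def shift_group(datastr,  blksize):
--     datastr = clean_datastr(datastr)
--     return [datastr[i:i+blksize] for i in range(len(datastr)-blksize+1)]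
--
-- def block_freq(datastr,  blksize=1,  shift=True):
--     datastr = clean_datastr(datastr)
--     diction = {}
--     if shift:
--         blocks = shift_group(datastr,  blksize)
--     else:
--         blocks = block_group(datastr,  blksize)
--     for sub in blocks:
--         if sub not in diction:
--             diction[sub] = blocks.count(sub)
--     return diction.items()
-- ===== SOURCE B (Python) =====
-- def block_freq(datastr, blksize=1, shift=True):
--     s = "".join(datastr.split()).upper()
--     if shift:
--         blocks = [s[i:i+blksize] for i in range(len(s)-blksize+1)]
--     else:
--         blocks = [s[i:i+blksize] for i in range(0, len(s), blksize)]
--     # Repeatedly extract all copies of the current head block: each round emits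
--     # one (key, count) pair in first-occurrence order and shrinks the list.
--     pairs = []
--     while blocks:
--         key = blocks[0]
--         rest = blocks[1:]
--         pairs.append((key, 1 + sum(1 for b in rest if b == key)))
--         blocks = [b for b in rest if b != key]
--     return dict(pairs).items()
-- ===== Notes on version B (the rewrite author's own statement) =====
-- stated objective: alternative
-- what changed: B keeps no dict and never rescans the full list: it repeatedly extracts every copy of the current head block (emit (head, 1+occurrences in the tail), recurse on the tail with those copies removed), producing the pairs directly in first-occurrence order, then wraps them in a dict only at the end; A instead walks the unchanged list with a seen-dict and a full blocks.count() scan per distinct key.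
import Mathlib
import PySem

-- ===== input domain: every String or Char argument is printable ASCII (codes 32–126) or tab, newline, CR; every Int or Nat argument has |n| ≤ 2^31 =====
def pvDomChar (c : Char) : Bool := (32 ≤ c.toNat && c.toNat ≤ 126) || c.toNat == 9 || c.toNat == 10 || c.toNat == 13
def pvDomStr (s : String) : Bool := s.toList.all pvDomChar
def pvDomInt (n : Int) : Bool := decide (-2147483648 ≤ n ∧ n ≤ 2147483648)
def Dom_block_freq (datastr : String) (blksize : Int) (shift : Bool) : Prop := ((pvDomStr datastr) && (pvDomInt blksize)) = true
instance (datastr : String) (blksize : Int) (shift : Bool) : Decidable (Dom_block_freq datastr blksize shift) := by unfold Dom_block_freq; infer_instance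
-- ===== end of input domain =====

-- B replaces A's seen-dict + full-list blocks.count() rescans by repeated head extraction:
-- emit (head, 1 + copies in the tail), recurse on the tail with those copies removed.

-- ===== PORT A =====
-- str.isupper(), ported by hand: exact on the ASCII domain, where the cased characters are
-- exactly the letters a–z/A–Z, so isupper() = (some letter present) && (no lowercase letter).
def strIsupperPort (s : String) : Bool :=
  (s.toList.any (fun c => PySem.Chars.isalpha c)) && (s.toList.all (fun c => !PySem.Chars.islower c))

def cleanDatastrA (s : String) : String :=
  let s1 := if (PySem.Str.find s " " != 0 || PySem.Str.find s "\n" != 0 || PySem.Str.find s "\r" != 0)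
            then PySem.Str.join "" (PySem.Str.split₀ s) else s
  if !(strIsupperPort s1) then PySem.Str.upper s1 else s1

def blockGroupA (datastr : String) (blksize : Int) : List String :=
  let d := cleanDatastrA datastr
  (PySem.List.pyRange 0 (PySem.Str.len d) blksize).map
    (fun i => PySem.Str.slice d (some i) (some (i + blksize)))

def shiftGroupA (datastr : String) (blksize : Int) : List String :=
  let d := cleanDatastrA datastr
  (PySem.List.pyRange 0 (PySem.Str.len d - blksize + 1) 1).map
    (fun i => PySem.Str.slice d (some i) (some (i + blksize)))

def block_freq (datastr : String) (blksize : Int) (shift : Bool) : List (String × Int) :=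
  let cleaned := cleanDatastrA datastr
  let blocks := if shift then shiftGroupA cleaned blksize else blockGroupA cleaned blksize
  (blocks.foldl
    (fun diction sub =>
      if diction.contains sub then diction
      else diction.insert sub ((PySem.List.count blocks sub : Nat) : Int))
    (PySem.Dict.empty : PySem.Dict String Int)).items

-- ===== PORT B =====
-- B's while loop: pop all copies of the head, emit one pair, loop on what is left.
-- The loop is ported with fuel = the initial length: every round removes at least the head,
-- so the fuel never runs out (proved in extractRunsGo_eq below).
def extractRunsGo : Nat → List String → List (String × Int)
  | _, [] => []
  | 0, _ :: _ => []
  | fuel + 1, key :: rest =>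
      (key, 1 + (rest.filter (fun b => b == key)).foldl (fun acc _ => acc + 1) (0 : Int))
        :: extractRunsGo fuel (rest.filter (fun b => !(b == key)))

def extractRuns (blocks : List String) : List (String × Int) :=
  extractRunsGo blocks.length blocks

def block_freq_alt (datastr : String) (blksize : Int) (shift : Bool) : List (String × Int) :=
  let s := PySem.Str.upper (PySem.Str.join "" (PySem.Str.split₀ datastr))
  let blocks :=
    if shift then
      (PySem.List.pyRange 0 (PySem.Str.len s - blksize + 1) 1).map
        (fun i => PySem.Str.slice s (some i) (some (i + blksize)))
    else
      (PySem.List.pyRange 0 (PySem.Str.len s) blksize).map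
        (fun i => PySem.Str.slice s (some i) (some (i + blksize)))
  let pairs := extractRuns blocks
  (pairs.foldl (fun d p => d.insert p.1 p.2) (PySem.Dict.empty : PySem.Dict String Int)).items

-- ===== PRECONDITION & SPEC =====
-- Pre_ excludes only shift = false with blksize = 0, where Python's range(0, len, 0) raises ValueError.
def Pre_block_freq (datastr : String) (blksize : Int) (shift : Bool) : Prop :=
  shift = true ∨ blksize ≠ 0
instance (datastr : String) (blksize : Int) (shift : Bool) : Decidable (Pre_block_freq datastr blksize shift) := by unfold Pre_block_freq; infer_instance
def pvWitness_block_freq : String × Int × Bool := ("Hello World", 2, true)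

def Spec_block_freq (datastr : String) (blksize : Int) (shift : Bool) (out : List (String × Int)) : Prop := out = block_freq_alt datastr blksize shift
instance (datastr : String) (blksize : Int) (shift : Bool) (out : List (String × Int)) : Decidable (Spec_block_freq datastr blksize shift out) := by unfold Spec_block_freq; infer_instance

-- ===== CLAIM (what is proved, stated in full; the proofs are below) =====
def Claim_equal_block_freq : Prop := ∀ (datastr : String) (blksize : Int) (shift : Bool), Dom_block_freq datastr blksize shift → Pre_block_freq datastr blksize shift → Spec_block_freq datastr blksize shift (block_freq datastr blksize shift)

-- ===== LEMMAS AND PROOFS =====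

lemma str_ext {a b : String} (h : a.toList = b.toList) : a = b := by
  have := congrArg String.ofList h
  simpa using this

-- s.find.go returns -1 or an index ≥ its counter
lemma find_go_spec (sub : List Char) : ∀ (s : List Char) (k : Nat),
    PySem.Chars.find.go sub s k = -1 ∨ (k : Int) ≤ PySem.Chars.find.go sub s k := by
  intro s
  induction s with
  | nil =>
    intro k; rw [PySem.Chars.find.go]; split
    · right; simp
    · left; rfl
  | cons c cs ih =>
    intro k
    rw [PySem.Chars.find.go]
    split
    · right; simp
    · rcases ih (k+1) with h | h
      · left; exact h
      · right; omega

lemma find_single_zero {s : List Char} {c : Char} (h : PySem.Chars.find s [c] = 0) :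
    s.head? = some c := by
  cases s with
  | nil => simp [PySem.Chars.find, PySem.Chars.find.go] at h
  | cons a as =>
    unfold PySem.Chars.find at h
    rw [PySem.Chars.find.go] at h
    by_cases hp : [c].isPrefixOf (a :: as) = true
    · simp [List.isPrefixOf] at hp
      simp [hp]
    · simp [hp] at h
      rcases find_go_spec [c] as 1 with hg | hg <;> omega

-- the guard of clean_datastr is true on every string (the three finds cannot all be 0)
lemma cond_always (s : String) :
    (PySem.Str.find s " " != 0 || PySem.Str.find s "\n" != 0 || PySem.Str.find s "\r" != 0) = true := by
  by_contra hc
  simp only [Bool.or_eq_true, bne_iff_ne, not_or, not_not, ne_eq] at hc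
  have h1 := hc.1.1
  have h2 := hc.1.2
  have e1 := find_single_zero (s := s.toList) (c := ' ') (by simpa [PySem.Str.find] using h1)
  have e2 := find_single_zero (s := s.toList) (c := '\n') (by simpa [PySem.Str.find] using h2)
  rw [e1] at e2
  simp at e2

lemma toNat_ofNat_sub32 {c : Char} (h1 : 'a' ≤ c) (h2 : c ≤ 'z') :
    (Char.ofNat (c.toNat - 32)).toNat = c.toNat - 32 := by
  have ha : 97 ≤ c.toNat := h1
  have hb : c.toNat ≤ 122 := h2
  unfold Char.ofNat
  split
  · rename_i h; rfl
  · rename_i h; exact absurd (Or.inl (by omega)) h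

lemma islower_upperChar (c : Char) : PySem.Chars.islower (PySem.Chars.upperChar c) = false := by
  unfold PySem.Chars.upperChar
  split
  · rename_i h
    simp only [PySem.Chars.islower, Bool.and_eq_true, decide_eq_true_eq] at h
    have ht := toNat_ofNat_sub32 h.1 h.2
    have ha : 97 ≤ c.toNat := h.1
    have hb : c.toNat ≤ 122 := h.2
    simp only [PySem.Chars.islower, Bool.and_eq_false_iff]
    left
    simp only [decide_eq_false_iff_not]
    rw [Char.le_def, UInt32.le_iff_toNat_le]
    show ¬(97 ≤ (Char.ofNat (c.toNat - 32)).toNat)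
    rw [ht]
    omega
  · rename_i h
    simpa using h

lemma isspace_upperChar (c : Char) (h : PySem.Chars.isspace c = false) :
    PySem.Chars.isspace (PySem.Chars.upperChar c) = false := by
  unfold PySem.Chars.upperChar
  split
  · rename_i hl
    simp only [PySem.Chars.islower, Bool.and_eq_true, decide_eq_true_eq] at hl
    have ht := toNat_ofNat_sub32 hl.1 hl.2
    have ha : 97 ≤ c.toNat := hl.1
    have hb : c.toNat ≤ 122 := hl.2
    simp only [PySem.Chars.isspace, Bool.or_eq_false_iff, Bool.and_eq_false_iff,
      decide_eq_false_iff_not, ht]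
    omega
  · exact h

lemma upper_of_no_lower {s : String} (h : s.toList.all (fun c => !PySem.Chars.islower c) = true) :
    PySem.Str.upper s = s := by
  apply str_ext
  rw [PySem.Str.toList_upper]
  unfold PySem.Chars.upper
  have : s.toList.map PySem.Chars.upperChar = s.toList.map id := by
    apply List.map_congr_left
    intro a ha
    have := (List.all_eq_true.mp h) a ha
    simp only [Bool.not_eq_true'] at this
    simp [PySem.Chars.upperChar, this]
  simpa using this

lemma intercalate_nil_sep (L : List (List Char)) : List.intercalate [] L = L.flatten := by
  induction L with
  | nil => rfl
  | cons a t ih =>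
    cases t with
    | nil => simp [List.intercalate]
    | cons b u =>
      simp only [List.intercalate, List.intersperse] at *
      simp_all [List.flatten]

-- every piece produced by split() is whitespace-free
lemma split₀_go_parts : ∀ (s cur : List Char) (acc : List (List Char)),
    (∀ c ∈ cur, PySem.Chars.isspace c = false) →
    (∀ p ∈ acc, ∀ c ∈ p, PySem.Chars.isspace c = false) →
    ∀ p ∈ PySem.Chars.split₀.go s cur acc, ∀ c ∈ p, PySem.Chars.isspace c = false := by
  intro s
  induction s with
  | nil =>
    intro cur acc hcur hacc
    rw [PySem.Chars.split₀.go]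
    split
    · simpa using fun p hp => hacc p hp
    · intro p hp
      simp only [List.reverse_cons, List.mem_append, List.mem_reverse, List.mem_singleton] at hp
      rcases hp with h | h
      · exact hacc p h
      · subst h; intro x hx; exact hcur x (by simpa using hx)
  | cons c rest ih =>
    intro cur acc hcur hacc
    rw [PySem.Chars.split₀.go]
    split
    · split
      · exact ih [] acc (by simp) hacc
      · apply ih [] _ (by simp)
        intro p hp
        rcases List.mem_cons.mp hp with h | h
        · subst h; intro x hx; exact hcur x (by simpa using hx)
        · exact hacc p h
    · rename_i hns
      apply ih (c :: cur) acc _ hacc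
      intro x hx
      rcases List.mem_cons.mp hx with h | h
      · subst h; simpa using hns
      · exact hcur x h

lemma join_split_no_space (s : String) {c : Char}
    (hc : c ∈ (PySem.Str.join "" (PySem.Str.split₀ s)).toList) : PySem.Chars.isspace c = false := by
  rw [PySem.Str.toList_join] at hc
  unfold PySem.Chars.join at hc
  have e : "".toList = ([] : List Char) := rfl
  rw [e, intercalate_nil_sep] at hc
  rw [List.mem_flatten] at hc
  obtain ⟨p, hp, hcp⟩ := hc
  simp only [PySem.Str.split₀, List.map_map, List.mem_map] at hp
  obtain ⟨q, hq, rfl⟩ := hp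
  have hq' : ∀ x ∈ q, PySem.Chars.isspace x = false :=
    split₀_go_parts s.toList [] [] (by simp) (by simp) q hq
  exact hq' c (by simpa using hcp)

-- split() of a whitespace-free string collapses back under join
lemma split₀_go_no_space : ∀ (s cur : List Char) (acc : List (List Char)),
    (∀ c ∈ s, PySem.Chars.isspace c = false) →
    PySem.Chars.split₀.go s cur acc =
      (if cur.reverse ++ s = [] then acc.reverse else acc.reverse ++ [cur.reverse ++ s]) := by
  intro s
  induction s with
  | nil =>
    intro cur acc _
    rw [PySem.Chars.split₀.go]
    cases cur <;> simp
  | cons c rest ih =>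
    intro cur acc hs
    rw [PySem.Chars.split₀.go]
    have hc : PySem.Chars.isspace c = false := hs c (by simp)
    rw [if_neg (by simp [hc])]
    rw [ih (c :: cur) acc (fun x hx => hs x (by simp [hx]))]
    simp

lemma join_split_of_no_space {s : String} (h : ∀ c ∈ s.toList, PySem.Chars.isspace c = false) :
    PySem.Str.join "" (PySem.Str.split₀ s) = s := by
  have hsp : PySem.Chars.split₀ s.toList = if s.toList = [] then [] else [s.toList] := by
    unfold PySem.Chars.split₀
    rw [split₀_go_no_space s.toList [] [] h]
    simp
  apply str_ext
  rw [PySem.Str.toList_join]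
  unfold PySem.Chars.join
  simp only [PySem.Str.split₀, List.map_map, hsp]
  split
  · rename_i he; simp [he, List.intercalate]
  · simp [intercalate_nil_sep]

-- A's clean_datastr equals B's one-expression cleaning
lemma cleanA_eq_cleanB (s : String) :
    cleanDatastrA s = PySem.Str.upper (PySem.Str.join "" (PySem.Str.split₀ s)) := by
  unfold cleanDatastrA
  rw [if_pos (cond_always s)]
  set t := PySem.Str.join "" (PySem.Str.split₀ s) with ht
  show (if (!strIsupperPort t) = true then PySem.Str.upper t else t) = PySem.Str.upper t
  by_cases hu : strIsupperPort t = true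
  · rw [hu]
    simp only [Bool.not_true, Bool.false_eq_true, if_false]
    exact (upper_of_no_lower ((Bool.and_eq_true _ _).mp hu).2).symm
  · have hu' : strIsupperPort t = false := by simpa using hu
    rw [hu']
    simp

lemma upper_no_lower_chars (x : String) :
    (PySem.Str.upper x).toList.all (fun c => !PySem.Chars.islower c) = true := by
  rw [PySem.Str.toList_upper]
  unfold PySem.Chars.upper
  simp only [List.all_map, List.all_eq_true]
  intro c _
  simp [Function.comp, islower_upperChar]

-- A re-cleans inside shift_group/block_group; cleaning is idempotent
lemma cleanA_idem (s : String) : cleanDatastrA (cleanDatastrA s) = cleanDatastrA s := by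
  rw [cleanA_eq_cleanB s, cleanA_eq_cleanB]
  set u := PySem.Str.upper (PySem.Str.join "" (PySem.Str.split₀ s)) with hu
  have hns : ∀ c ∈ u.toList, PySem.Chars.isspace c = false := by
    intro c hc
    rw [hu, PySem.Str.toList_upper] at hc
    unfold PySem.Chars.upper at hc
    obtain ⟨a, ha, rfl⟩ := List.mem_map.mp hc
    exact isspace_upperChar a (join_split_no_space s ha)
  rw [join_split_of_no_space hns]
  exact upper_of_no_lower (upper_no_lower_chars _)

lemma filter_discard {p : String → Bool} {x : String} (hp : p x = false) (s : List String) :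
    (PySem.Set.discard s x).filter p = s.filter p := by
  unfold PySem.Set.discard
  rw [List.filter_filter]
  apply List.filter_congr
  intro a _
  by_cases hax : a = x
  · subst hax; simp [hp]
  · simp [hax]

-- A's membership-guarded count loop emits one (key, count) pair per first occurrence
lemma a_loop_items (cnt : String → Int) :
    ∀ (xs : List String) (d : PySem.Dict String Int),
    (xs.foldl (fun diction sub => if diction.contains sub then diction
               else diction.insert sub (cnt sub)) d).items
      = d.items ++ ((PySem.Set.ofList xs).filter (fun k => !d.contains k)).map (fun k => (k, cnt k)) := by
  intro xs
  induction xs with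
  | nil => intro d; simp [PySem.Set.ofList]
  | cons x xs ih =>
    intro d
    rw [List.foldl_cons, PySem.Set.ofList_cons]
    by_cases hc : d.contains x = true
    · rw [if_pos hc, ih d]
      congr 1
      rw [List.filter_cons_of_neg (by simp [hc])]
      rw [filter_discard (by simp [hc])]
    · have hc' : d.contains x = false := by simpa using hc
      rw [if_neg (by simp [hc']), ih]
      rw [PySem.Dict.items_insert_of_not_contains _ _ hc']
      rw [List.filter_cons_of_pos (by simp [hc'])]
      rw [List.append_assoc]
      congr 1
      simp only [List.map_cons]
      have h1 : ((PySem.Set.ofList xs).discard x).filter (fun k => !d.contains k)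
          = (PySem.Set.ofList xs).filter (fun k => !d.contains k && !(k == x)) := by
        unfold PySem.Set.discard
        rw [List.filter_filter]
      have h2 : (PySem.Set.ofList xs).filter (fun k => !(d.insert x (cnt x)).contains k)
          = (PySem.Set.ofList xs).filter (fun k => !d.contains k && !(k == x)) :=
        List.filter_congr (fun a _ => by rw [PySem.Dict.contains_insert, Bool.not_or, Bool.and_comm])
      rw [h1, h2]
      simp

-- set() commutes with filter: dedup-keep-first of a filtered list is the filtered dedup
lemma ofList_filter (p : String → Bool) : ∀ (xs : List String),
    PySem.Set.ofList (xs.filter p) = (PySem.Set.ofList xs).filter p := by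
  intro xs
  induction xs with
  | nil => rfl
  | cons a xs ih =>
    by_cases hp : p a = true
    · rw [List.filter_cons_of_pos hp, PySem.Set.ofList_cons, PySem.Set.ofList_cons,
        List.filter_cons_of_pos hp, ih]
      unfold PySem.Set.discard
      rw [List.filter_filter, List.filter_filter]
      exact congrArg (List.cons a) (List.filter_congr (fun y _ => Bool.and_comm _ _))
    · have hp' : p a = false := by simpa using hp
      rw [List.filter_cons_of_neg (by simp [hp']), PySem.Set.ofList_cons,
        List.filter_cons_of_neg (by simp [hp']), ih, filter_discard hp']

-- Python's sum() of 1s is a left fold: it computes the length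
lemma foldl_add_one (l : List String) : l.foldl (fun acc _ => acc + 1) (0 : Int) = (l.length : Int) := by
  suffices h : ∀ (a : Int), l.foldl (fun acc _ => acc + 1) a = a + l.length by simpa using h 0
  induction l with
  | nil => intro a; simp
  | cons x xs ih => intro a; simp [ih]; ring

-- B's while loop computes exactly (first occurrence, multiplicity) pairs
lemma extractRunsGo_eq : ∀ (fuel : Nat) (xs : List String), xs.length ≤ fuel →
    extractRunsGo fuel xs
      = (PySem.Set.ofList xs).map (fun k => (k, ((PySem.List.count xs k : Nat) : Int))) := by
  intro fuel
  induction fuel with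
  | zero =>
    intro xs hx
    cases xs with
    | nil => rfl
    | cons x rest => simp at hx
  | succ n ih =>
    intro xs hx
    cases xs with
    | nil => rfl
    | cons x rest =>
      rw [extractRunsGo, PySem.Set.ofList_cons, List.map_cons]
      have hsum : (rest.filter (fun b => b == x)).foldl (fun acc _ => acc + 1) (0 : Int)
          = ((PySem.List.count rest x : Nat) : Int) := by
        rw [foldl_add_one]
        simp [PySem.List.count_eq, List.count_eq_countP, List.countP_eq_length_filter]
      have hlen : (rest.filter (fun b => !(b == x))).length ≤ n := by
        have := List.length_filter_le (fun b => !(b == x)) rest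
        simp at hx; omega
      rw [ih _ hlen]
      refine List.cons_eq_cons.mpr ⟨?_, ?_⟩
      · congr 1
        rw [hsum]
        simp [PySem.List.count_eq, List.count_cons_self]
        ring
      · rw [ofList_filter]
        have hd : (PySem.Set.ofList rest).filter (fun b => !(b == x))
            = PySem.Set.discard (PySem.Set.ofList rest) x := rfl
        rw [hd]
        apply List.map_congr_left
        intro k hk
        have hkx : k ≠ x := ((PySem.Set.mem_discard _ _ _).mp hk).2
        congr 1
        simp only [PySem.List.count_eq]
        simp [List.count_filter, hkx, Ne.symm hkx]

-- dict(pairs) over distinct keys returns the pairs unchanged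
lemma extractRuns_eq (xs : List String) :
    extractRuns xs = (PySem.Set.ofList xs).map (fun k => (k, ((PySem.List.count xs k : Nat) : Int))) :=
  extractRunsGo_eq xs.length xs le_rfl

lemma dict_of_extractRuns (xs : List String) :
    ((extractRuns xs).foldl (fun d p => d.insert p.1 p.2)
      (PySem.Dict.empty : PySem.Dict String Int)).items = extractRuns xs := by
  have hkeys : ((extractRuns xs).map Prod.fst).Nodup := by
    rw [extractRuns_eq, List.map_map]
    have : (Prod.fst ∘ fun k => (k, ((PySem.List.count xs k : Nat) : Int))) = id := rfl
    rw [this, List.map_id]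
    exact PySem.Set.nodup_ofList xs
  have := PySem.Dict.items_foldl_insert_fresh (l := extractRuns xs) (k := Prod.fst)
    (v := Prod.snd) (d := (PySem.Dict.empty : PySem.Dict String Int))
    (by intro a _; exact PySem.Dict.contains_empty _) hkeys
  simpa using this

-- ===== VERDICT (by name: the statement is the Claim_ definition above) =====
theorem block_freq_spec : Claim_equal_block_freq := by
  intro datastr blksize shift _ _
  unfold Spec_block_freq block_freq block_freq_alt shiftGroupA blockGroupA
  simp only [cleanA_idem]
  rw [cleanA_eq_cleanB]
  cases shift
  · simp only [Bool.false_eq_true, if_false]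
    rw [dict_of_extractRuns, extractRuns_eq, a_loop_items]
    have he : (PySem.Dict.empty : PySem.Dict String Int).items = [] := rfl
    rw [he]
    simp [PySem.Dict.contains_empty]
  · simp only [if_true]
    rw [dict_of_extractRuns, extractRuns_eq, a_loop_items]
    have he : (PySem.Dict.empty : PySem.Dict String Int).items = [] := rfl
    rw [he]
    simp [PySem.Dict.contains_empty]
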